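-- pv_equiv track=rewrite | github.com/systemSpiderm/Resolution | resolve.py | isResolvable
-- ===== SOURCE A (Python) =====
-- def isVariable(item : str) -> bool:
--     #判断所给的项是不是一个变量    函数、常量（长度大于一）、变量（长度等于一）
--     return len(item) == 1 and item.find('(') == -1
--
-- def parseLiteral(literal : str) -> list:
--     #解析文字，返回列表，[否定（bool），谓词，参数1，参数2...]，如果有否定词，那么第一个元素为True
--     res = []
--     if literal[0] == '~':
--         res.append(True)
--         literal = literal[1:]
--     else:
--         res.append(False)
--     end = literal.find('(')
--     predicate = literal[:end]
--     res.append(predicate)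
--     parameters = literal[end + 1:-1].split(',')
--     res += parameters
--     return res
--
-- def MGU(parsing_1 : list, parsing_2 : list, substitutions : dict = {}) -> bool:
--     #对两个文字解析完成的列表进行MGU算法，替换后修改字典中key = 变量，value = 替换的项，返回False表示不可替换
--     if parsing_1[1] != parsing_2[1] or len(parsing_1) != len(parsing_2):   #谓词不同或者参数数量不同，无法合一
--         return False
--     for param_1, param_2 in zip(parsing_1[2:],parsing_2[2:]):    #比较参数列表
--         if param_1 == param_2:
--             continue
--         if '(' in param_1 and "(" in param_2:
--             #处理函数的情形
--             i = 0
--             cnt = 0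
--             while param_1[i] == param_2[i]:
--                 if param_1[i] == '(':
--                     cnt += 1
--                 i += 1
--             param_1 = param_1[i:-cnt]           #剥离出不同的部分，这样就把有函数的部分化归为无函数的部分
--             param_2 = param_2[i:-cnt]
--         if not isVariable(param_1) and not isVariable(param_2):  #如果都是常量，不可替换
--             return False
--         if isVariable(param_1):
--             if param_1 in param_2:              #执行occur检查，如果变量v出现在项t中，则不可合一
--                 return False
--             substitutions[param_1] = param_2
--         elif isVariable(param_2):
--             if param_2 in param_1:
--                 return False                    #执行occur检查，如果变量v出现在项t中，则不可合一
--             substitutions[param_2] = param_1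
--     return True
--
-- def isResolvable(sentence_1 : tuple[str], sentence_2 : tuple[str]) -> tuple[int, int]:
--     #判断两个子句是否可以归结，可以则返回子句的下标（从0开始）表示第几个文字
--     for i in range(len(sentence_1)):
--         for j in range(len(sentence_2)):
--             parsing_1 = parseLiteral(sentence_1[i])
--             parsing_2 = parseLiteral(sentence_2[j])
--             if (parsing_1[0] ^ parsing_2[0]) and (parsing_1[1] == parsing_2[1]):  #谓词相同，否定相反，可以归结
--                 substitutions = {}
--                 if MGU(parsing_1, parsing_2, substitutions):
--                     return (i, j)
--     return (-1, -1)
-- ===== SOURCE B (Python) =====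
-- def _parse(lit):
--     # (negated, predicate, parameter list) of one literal
--     neg = lit.startswith('~')
--     body = lit[1:] if neg else lit
--     end = body.find('(')
--     return (neg, body[:end], body[end + 1:-1].split(','))
--
-- def _unifiable(x, y):
--     # can the single parameter pair x, y be unified (no substitution map kept:
--     # the caller only needs the boolean)
--     if x == y:
--         return True
--     if '(' in x and '(' in y:
--         k = 0
--         while k < len(x) and k < len(y) and x[k] == y[k]:
--             k += 1
--         opens = x[:k].count('(')
--         x = x[k:len(x) - opens]
--         y = y[k:len(y) - opens]
--     vx = len(x) == 1 and '(' not in x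
--     vy = len(y) == 1 and '(' not in y
--     if vx:
--         return x not in y
--     if vy:
--         return y not in x
--     return False
--
-- def isResolvable(sentence_1, sentence_2):
--     # index sentence_2's literals once by (predicate, negation); each literal of
--     # sentence_1 then scans only its complementary bucket, in original j order
--     buckets = {}
--     for j, lit in enumerate(sentence_2):
--         neg, pred, args = _parse(lit)
--         key = (pred, neg)
--         buckets[key] = buckets.get(key, []) + [(j, args)]
--     for i, lit in enumerate(sentence_1):
--         neg, pred, args = _parse(lit)
--         for j, args2 in buckets.get((pred, not neg), []):
--             if len(args) == len(args2) and all(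
--                     _unifiable(x, y) for x, y in zip(args, args2)):
--                 return (i, j)
--     return (-1, -1)
-- ===== Notes on version B (the rewrite author's own statement) =====
-- stated objective: faster
-- what changed: B parses every literal of both clauses exactly once, groups sentence_2's literals into a dictionary of buckets keyed by (predicate, negation), and for each left literal scans only the complementary bucket with a stateless per-parameter unifiability test, instead of A's full nested scan that re-parses both literals and runs the mutating MGU loop on every pair.
-- outside the precondition, e.g. on isResolvable(('P(x)',), ('~P(y)', '')): A returns (0, 0), B returns (0, 0); on isResolvable(('Q(f(a))',), ('~P(f(a)c)',)): A returns (-1, -1), B returns (-1, -1)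
import Mathlib
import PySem

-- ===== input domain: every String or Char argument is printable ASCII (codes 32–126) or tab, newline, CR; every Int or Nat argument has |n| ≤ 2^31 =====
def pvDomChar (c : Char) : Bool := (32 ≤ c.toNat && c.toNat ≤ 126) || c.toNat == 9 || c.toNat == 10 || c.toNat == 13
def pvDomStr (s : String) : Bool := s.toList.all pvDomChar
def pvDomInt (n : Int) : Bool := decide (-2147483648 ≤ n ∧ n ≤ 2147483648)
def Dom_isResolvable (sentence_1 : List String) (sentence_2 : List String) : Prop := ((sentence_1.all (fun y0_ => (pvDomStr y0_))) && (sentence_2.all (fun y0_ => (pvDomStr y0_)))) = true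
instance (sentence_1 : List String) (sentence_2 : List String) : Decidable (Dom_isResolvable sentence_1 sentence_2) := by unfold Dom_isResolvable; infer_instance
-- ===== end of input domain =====

-- B parses both clauses once, indexes sentence_2's literals in a dictionary keyed by
-- (predicate, negation), and scans only the complementary bucket per left literal with a
-- stateless per-parameter unifiability test; A re-parses both literals inside a full
-- nested scan and runs the mutating MGU loop.

-- ===== PORT A =====
-- Python's heterogeneous parse list [neg, pred, param1, …] is represented as the triple
-- (neg, pred, params); parsing[0]/[1]/[2:] become the three components (exact).
-- 'none' marks exactly the inputs where the Python raises (IndexError).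

def pvIsVariableA (item : List Char) : Bool :=
  (PySem.Chars.len item == 1) && (PySem.Chars.find item ['('] == -1)

def pvParseLiteralA (lit : List Char) : Option (Bool × List Char × List (List Char)) :=
  match lit with
  | [] => none  -- literal[0] raises IndexError on the empty string
  | c :: _ =>
    let negl : Bool × List Char :=
      if c = '~' then (true, PySem.Chars.slice lit (some 1) none) else (false, lit)
    let e := PySem.Chars.find negl.2 ['(']
    let pred := PySem.Chars.slice negl.2 none (some e)
    let params := PySem.Chars.splitOn (PySem.Chars.slice negl.2 (some (e + 1)) (some (-1))) [',']
    some (negl.1, pred, params)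

-- the 'while param_1[i] == param_2[i]' loop: returns (final i, cnt); none = IndexError
def pvScanA : List Char → List Char → Option (Nat × Nat)
  | a :: as, b :: bs =>
      if a = b then
        (pvScanA as bs).map (fun ic => (ic.1 + 1, if a = '(' then ic.2 + 1 else ic.2))
      else some (0, 0)
  | _, _ => none

-- one iteration of MGU's for-loop: some (continue-with-true?, subs'); none = IndexError
def pvMGUstepA (p1 p2 : List Char) (subs : PySem.Dict (List Char) (List Char)) :
    Option (Bool × PySem.Dict (List Char) (List Char)) :=
  if p1 == p2 then some (true, subs)
  else
    let strip :=
      if PySem.Chars.isIn ['('] p1 && PySem.Chars.isIn ['('] p2 then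
        (pvScanA p1 p2).map (fun ic =>
          (PySem.Chars.slice p1 (some (ic.1 : Int)) (some (-(ic.2 : Int))),
           PySem.Chars.slice p2 (some (ic.1 : Int)) (some (-(ic.2 : Int)))))
      else some (p1, p2)
    match strip with
    | none => none
    | some (q1, q2) =>
      if !pvIsVariableA q1 && !pvIsVariableA q2 then some (false, subs)
      else if pvIsVariableA q1 then
        if PySem.Chars.isIn q1 q2 then some (false, subs)
        else some (true, subs.insert q1 q2)
      else
        if PySem.Chars.isIn q2 q1 then some (false, subs)
        else some (true, subs.insert q2 q1)

def pvMGUloopA : List (List Char × List Char) → PySem.Dict (List Char) (List Char) → Option Bool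
  | [], _ => some true
  | p :: rest, subs =>
    match pvMGUstepA p.1 p.2 subs with
    | none => none
    | some (false, _) => some false
    | some (true, subs') => pvMGUloopA rest subs'

def pvMGUA (pr1 pr2 : Bool × List Char × List (List Char))
    (subs : PySem.Dict (List Char) (List Char)) : Option Bool :=
  -- len(parsing_1) != len(parsing_2)  ⇔  the parameter lists have different lengths
  if pr1.2.1 != pr2.2.1 || pr1.2.2.length != pr2.2.2.length then some false
  else pvMGUloopA (pr1.2.2.zip pr2.2.2) subs

def pvInnerA (s1i : String) (i : Nat) : List String → Nat → Option (Option (Int × Int))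
  | [], _ => some none
  | s :: rest, j =>
    match pvParseLiteralA s1i.toList, pvParseLiteralA s.toList with
    | some pr1, some pr2 =>
      if (pr1.1 != pr2.1) && (pr1.2.1 == pr2.2.1) then
        match pvMGUA pr1 pr2 PySem.Dict.empty with
        | none => none
        | some true => some (some ((i : Int), (j : Int)))
        | some false => pvInnerA s1i i rest (j + 1)
      else pvInnerA s1i i rest (j + 1)
    | _, _ => none

def pvOuterA (s2 : List String) : List String → Nat → Option (Option (Int × Int))
  | [], _ => some none
  | s :: rest, i =>
    match pvInnerA s i s2 0 with
    | none => none
    | some (some v) => some (some v)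
    | some none => pvOuterA s2 rest (i + 1)

def isResolvable (sentence_1 : List String) (sentence_2 : List String) : Int × Int :=
  match pvOuterA sentence_2 sentence_1 0 with
  | some (some v) => v
  | _ => (-1, -1)

-- ===== PORT B =====

def pvParseB (lit : List Char) : Bool × List Char × List (List Char) :=
  let neg := PySem.Chars.startswith lit ['~']
  let body := if neg then PySem.Chars.slice lit (some 1) none else lit
  let e := PySem.Chars.find body ['(']
  (neg, PySem.Chars.slice body none (some e),
   PySem.Chars.splitOn (PySem.Chars.slice body (some (e + 1)) (some (-1))) [','])

-- Source B's bounded 'while k < len(x) and k < len(y) and x[k] == y[k]' loop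
def pvScanB : List Char → List Char → Nat
  | a :: as, b :: bs => if a = b then pvScanB as bs + 1 else 0
  | _, _ => 0

def pvUnifB (x y : List Char) : Bool :=
  if x == y then true
  else
    let xy :=
      if PySem.Chars.isIn ['('] x && PySem.Chars.isIn ['('] y then
        let k := pvScanB x y
        let opens := PySem.Chars.count (PySem.Chars.slice x none (some (k : Int))) ['(']
        (PySem.Chars.slice x (some (k : Int)) (some (PySem.Chars.len x - (opens : Int))),
         PySem.Chars.slice y (some (k : Int)) (some (PySem.Chars.len y - (opens : Int))))
      else (x, y)
    let vx := (PySem.Chars.len xy.1 == 1) && !PySem.Chars.isIn ['('] xy.1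
    let vy := (PySem.Chars.len xy.2 == 1) && !PySem.Chars.isIn ['('] xy.2
    if vx then !PySem.Chars.isIn xy.1 xy.2
    else if vy then !PySem.Chars.isIn xy.2 xy.1
    else false

-- Source B's inner 'for j, args2 in buckets.get(...)' loop over one bucket
def pvScanBucketB (a1 : List (List Char)) (i : Nat) :
    List (Nat × List (List Char)) → Option (Int × Int)
  | [] => none
  | ja :: rest =>
    if (a1.length == ja.2.length) && (a1.zip ja.2).all (fun p => pvUnifB p.1 p.2) then
      some ((i : Int), (ja.1 : Int))
    else pvScanBucketB a1 i rest

def pvOuterB (idx : PySem.Dict (List Char × Bool) (List (Nat × List (List Char)))) :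
    List (Bool × List Char × List (List Char)) → Nat → Option (Int × Int)
  | [], _ => none
  | pr :: rest, i =>
    match pvScanBucketB pr.2.2 i (idx.getD (pr.2.1, !pr.1) []) with
    | some v => some v
    | none => pvOuterB idx rest (i + 1)

-- key/value pair of one enumerated parsed literal: ((pred, neg), (j, args))
def pvKV (pj : (Bool × List Char × List (List Char)) × Nat) :
    ((List Char × Bool) × (Nat × List (List Char))) :=
  ((pj.1.2.1, pj.1.1), (pj.2, pj.1.2.2))

def isResolvable_alt (sentence_1 : List String) (sentence_2 : List String) : Int × Int :=
  let right := sentence_2.map (fun l => pvParseB l.toList)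
  -- 'buckets[key] = buckets.get(key, []) + [(j, args)]' over enumerate(sentence_2)
  let idx := ((right.zipIdx).map pvKV).foldl
      (fun d p => d.modify p.1 [] (· ++ [p.2])) PySem.Dict.empty
  let left := sentence_1.map (fun l => pvParseB l.toList)
  (pvOuterB idx left 0).getD (-1, -1)

-- ===== PRECONDITION & SPEC =====

-- standalone copy of the parameter-list extraction, so that Pre_ does not reach the ports
def pvPreParams (lit : List Char) : List (List Char) :=
  let body := if PySem.Chars.startswith lit ['~'] then PySem.Chars.slice lit (some 1) none else lit
  let e := PySem.Chars.find body ['(']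
  PySem.Chars.splitOn (PySem.Chars.slice body (some (e + 1)) (some (-1))) [',']

def pvHazard (x y : List Char) : Bool :=
  (x != y) && PySem.Chars.isIn ['('] x && PySem.Chars.isIn ['('] y
    && (x.isPrefixOf y || y.isPrefixOf x)

-- Pre_ excludes the inputs on which A raises an IndexError: a clause containing the empty
-- literal (parseLiteral reads literal[0]), and clause pairs with corresponding parameters
-- that both contain '(' and one of which is a prefix of the other (MGU's while loop runs
-- off the end); it is stated over every cross pair of literals, slightly stronger than A's
-- lazy execution order, so it also drops some inputs where A happens to return first.
def Pre_isResolvable (sentence_1 : List String) (sentence_2 : List String) : Prop :=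
  (sentence_1.all (fun l => !l.toList.isEmpty) && sentence_2.all (fun l => !l.toList.isEmpty)
    && sentence_1.all (fun a => sentence_2.all (fun b =>
         ((pvPreParams a.toList).zip (pvPreParams b.toList)).all
           (fun p => !pvHazard p.1 p.2)))) = true

instance (sentence_1 : List String) (sentence_2 : List String) :
    Decidable (Pre_isResolvable sentence_1 sentence_2) := by
  unfold Pre_isResolvable; infer_instance

def pvWitness_isResolvable : List String × List String := (["P(x)"], ["~P(y)"])

def Spec_isResolvable (sentence_1 : List String) (sentence_2 : List String) (out : Int × Int) : Prop :=
  out = isResolvable_alt sentence_1 sentence_2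

instance (sentence_1 : List String) (sentence_2 : List String) (out : Int × Int) :
    Decidable (Spec_isResolvable sentence_1 sentence_2 out) := by
  unfold Spec_isResolvable; infer_instance

-- ===== CLAIM (what is proved, stated in full; the proofs are below) =====
def Claim_equal_isResolvable : Prop := ∀ (sentence_1 : List String) (sentence_2 : List String), Dom_isResolvable sentence_1 sentence_2 → Pre_isResolvable sentence_1 sentence_2 → Spec_isResolvable sentence_1 sentence_2 (isResolvable sentence_1 sentence_2)

-- ===== LEMMAS AND PROOFS =====

theorem pvPreParams_eq (lit : List Char) : pvPreParams lit = (pvParseB lit).2.2 := rfl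

theorem pvParse_eq (lit : List Char) (h : lit ≠ []) :
    pvParseLiteralA lit = some (pvParseB lit) := by
  cases lit with
  | nil => cases h rfl
  | cons c r =>
    by_cases hc : c = '~'
    · have hs : PySem.Chars.startswith (c :: r) ['~'] = true :=
        (PySem.Chars.startswith_iff _ _).2 (List.cons_prefix_cons.2 ⟨hc.symm, List.nil_prefix⟩)
      subst hc
      simp [pvParseLiteralA, pvParseB, hs]
    · have hs : PySem.Chars.startswith (c :: r) ['~'] = false := by
        rw [← Bool.not_eq_true, PySem.Chars.startswith_iff]
        intro hp; exact hc (List.cons_prefix_cons.1 hp).1.symm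
      simp [pvParseLiteralA, pvParseB, hs, hc]

theorem pvScanA_some (x : List Char) : ∀ y, x ≠ y → ¬ x <+: y → ¬ y <+: x →
    ∃ i c, pvScanA x y = some (i, c) := by
  induction x with
  | nil => intro y _ h1 _; exact absurd List.nil_prefix h1
  | cons a as ih =>
    intro y hxy h1 h2
    cases y with
    | nil => exact absurd List.nil_prefix h2
    | cons b bs =>
      by_cases hab : a = b
      · subst hab
        obtain ⟨i, c, hic⟩ := ih bs (fun h => hxy (by rw [h]))
          (fun h => h1 (List.cons_prefix_cons.2 ⟨rfl, h⟩))
          (fun h => h2 (List.cons_prefix_cons.2 ⟨rfl, h⟩))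
        exact ⟨i + 1, if a = '(' then c + 1 else c, by simp [pvScanA, hic]⟩
      · exact ⟨0, 0, by simp [pvScanA, hab]⟩

theorem pvScanA_spec : ∀ (x y : List Char) (i c : Nat), pvScanA x y = some (i, c) →
    pvScanB x y = i ∧ c = (x.take i).count '(' ∧ x.take i = y.take i ∧
      i ≤ x.length ∧ i ≤ y.length := by
  intro x
  induction x with
  | nil => intro y i c h; simp [pvScanA] at h
  | cons a as ih =>
    intro y i c h
    cases y with
    | nil => simp [pvScanA] at h
    | cons b bs =>
      by_cases hab : a = b
      · subst hab
        cases hsc : pvScanA as bs with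
        | none => simp [pvScanA, hsc] at h
        | some ic =>
          obtain ⟨i', c'⟩ := ic
          simp [pvScanA, hsc] at h
          obtain ⟨hi, hc⟩ := h
          subst hi; subst hc
          obtain ⟨h1, h2, h3, h4, h5⟩ := ih bs i' c' hsc
          refine ⟨by simp [pvScanB, h1], ?_, ?_, by simp; omega, by simp; omega⟩
          · rw [List.take_succ_cons, List.count_cons]
            by_cases hpa : a = '(' <;> simp [hpa, ← h2]
          · rw [List.take_succ_cons, List.take_succ_cons, h3]
      · simp only [pvScanA, if_neg hab] at h
        simp at h
        obtain ⟨hi, hc⟩ := h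
        subst hi; subst hc
        exact ⟨by simp [pvScanB, hab], by simp, by simp, by simp, by simp⟩

theorem pvCountGo (c : Char) : ∀ (fuel : Nat) (l : List Char) (acc : Nat), l.length ≤ fuel →
    PySem.Chars.count.go [c] fuel l acc = acc + l.count c := by
  intro fuel
  induction fuel with
  | zero =>
    intro l acc h
    cases l with
    | nil => simp [PySem.Chars.count.go]
    | cons a t => simp at h
  | succ n ih =>
    intro l acc h
    cases l with
    | nil => simp [PySem.Chars.count.go]
    | cons a t =>
      rw [PySem.Chars.count.go]
      by_cases hca : c = a
      · subst hca
        have hpre : [c].isPrefixOf (c :: t) = true :=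
          List.isPrefixOf_iff_prefix.2 (List.cons_prefix_cons.2 ⟨rfl, List.nil_prefix⟩)
        simp only [hpre, if_true]
        have hdrop : List.drop [c].length (c :: t) = t := by simp
        rw [hdrop, ih t (acc + 1) (by simp at h; omega)]
        simp
        omega
      · have hpre : [c].isPrefixOf (a :: t) = false := by
          rw [← Bool.not_eq_true, List.isPrefixOf_iff_prefix, List.cons_prefix_cons]
          intro hp; exact hca hp.1
        simp only [hpre]
        rw [if_neg (by simp)]
        rw [ih t acc (by simp at h; omega)]
        have hac : ¬ a = c := fun hh => hca hh.symm
        simp [hac]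

theorem pvCountSingleton (s : List Char) (c : Char) :
    PySem.Chars.count s [c] = s.count c := by
  rw [PySem.Chars.count]
  simp only [List.isEmpty_cons]
  simpa using pvCountGo c s.length s 0 (le_refl _)

theorem pvClampEq (n c : Nat) (hc : 0 < c) (hcl : c ≤ n) :
    PySem.List.clampIdx n (-(c : Int)) = PySem.List.clampIdx n ((n : Int) - (c : Int)) := by
  unfold PySem.List.clampIdx; split_ifs <;> omega

theorem pvSliceNeg (xs : List Char) (i c : Nat) (hc : 0 < c) (hcl : c ≤ xs.length) :
    PySem.List.slice xs (some (i : Int)) (some (-(c : Int))) =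
    PySem.List.slice xs (some (i : Int)) (some ((xs.length : Int) - (c : Int))) := by
  simp [PySem.List.slice, pvClampEq xs.length c hc hcl]

theorem pvSliceZero (xs : List Char) (i : Nat) :
    PySem.List.slice xs (some (i : Int)) (some (0 : Int)) = [] := by
  simp [PySem.List.slice, PySem.List.clampIdx]

theorem pvSliceFull (xs : List Char) (k : Nat) :
    PySem.List.slice xs (some (k : Int)) (some ((xs.length : Int))) = xs.drop k := by
  have h1 : PySem.List.clampIdx xs.length ((xs.length : Int)) = xs.length := by
    unfold PySem.List.clampIdx; split_ifs <;> omega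
  have h2 : PySem.List.clampIdx xs.length ((k : Int)) = min k xs.length := by
    unfold PySem.List.clampIdx; split_ifs <;> omega
  simp only [PySem.List.slice, h1, h2]
  rcases Nat.le_total k xs.length with hk | hk
  · rw [Nat.min_eq_left hk]
    exact List.take_of_length_le (by simp)
  · rw [Nat.min_eq_right hk]
    simp [List.drop_eq_nil_of_le hk]

theorem pvVar_eq (q : List Char) :
    pvIsVariableA q = ((PySem.Chars.len q == 1) && !PySem.Chars.isIn ['('] q) := by
  unfold pvIsVariableA
  congr 1
  cases hI : PySem.Chars.isIn ['('] q
  · have : PySem.Chars.find q ['('] = -1 :=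
      (PySem.Chars.find_eq_neg_one_iff _ _).2 ((PySem.Chars.isIn_eq_false_iff _ _).1 hI)
    simp [this]
  · have : PySem.Chars.find q ['('] ≠ -1 := by
      rw [PySem.Chars.find_ne_neg_one_iff]
      exact (PySem.Chars.isIn_iff_infix _ _).1 hI
    simp [this]

def pvBranchA (q1 q2 : List Char) (subs : PySem.Dict (List Char) (List Char)) :
    Option (Bool × PySem.Dict (List Char) (List Char)) :=
  if !pvIsVariableA q1 && !pvIsVariableA q2 then some (false, subs)
  else if pvIsVariableA q1 then
    if PySem.Chars.isIn q1 q2 then some (false, subs)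
    else some (true, subs.insert q1 q2)
  else
    if PySem.Chars.isIn q2 q1 then some (false, subs)
    else some (true, subs.insert q2 q1)

def pvBranchB (q1 q2 : List Char) : Bool :=
  if (PySem.Chars.len q1 == 1) && !PySem.Chars.isIn ['('] q1 then !PySem.Chars.isIn q1 q2
  else if (PySem.Chars.len q2 == 1) && !PySem.Chars.isIn ['('] q2 then !PySem.Chars.isIn q2 q1
  else false

theorem pvBranch_eq (q1 q2 : List Char) (subs : PySem.Dict (List Char) (List Char)) :
    ∃ d, pvBranchA q1 q2 subs = some (pvBranchB q1 q2, d) := by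
  unfold pvBranchA pvBranchB
  rw [← pvVar_eq q1, ← pvVar_eq q2]
  cases h1 : pvIsVariableA q1 <;> cases h2 : pvIsVariableA q2
  · exact ⟨subs, by simp⟩
  · cases hi : PySem.Chars.isIn q2 q1
    · exact ⟨subs.insert q2 q1, by simp⟩
    · exact ⟨subs, by simp⟩
  · cases hi : PySem.Chars.isIn q1 q2
    · exact ⟨subs.insert q1 q2, by simp⟩
    · exact ⟨subs, by simp⟩
  · cases hi : PySem.Chars.isIn q1 q2
    · exact ⟨subs.insert q1 q2, by simp⟩
    · exact ⟨subs, by simp⟩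

theorem pvStep_eq (x y : List Char) (h : pvHazard x y = false)
    (subs : PySem.Dict (List Char) (List Char)) :
    ∃ d, pvMGUstepA x y subs = some (pvUnifB x y, d) := by
  by_cases hxy : x = y
  · subst hxy; exact ⟨subs, by simp [pvMGUstepA, pvUnifB]⟩
  · have hbe : (x == y) = false := by simp [hxy]
    by_cases hin : (PySem.Chars.isIn ['('] x && PySem.Chars.isIn ['('] y) = true
    · have hnp : ¬ x <+: y ∧ ¬ y <+: x := by
        unfold pvHazard at h
        rw [Bool.and_eq_false_iff, Bool.and_eq_false_iff, Bool.and_eq_false_iff] at h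
        rcases h with ((h | h) | h) | h
        · rw [bne_eq_false_iff_eq] at h; exact absurd h hxy
        · rw [Bool.and_eq_true] at hin; rw [hin.1] at h; exact absurd h (by decide)
        · rw [Bool.and_eq_true] at hin; rw [hin.2] at h; exact absurd h (by decide)
        · rw [Bool.or_eq_false_iff] at h
          exact ⟨fun hp => by rw [(List.isPrefixOf_iff_prefix).2 hp] at h; exact absurd h.1 (by simp),
                 fun hp => by rw [(List.isPrefixOf_iff_prefix).2 hp] at h; exact absurd h.2 (by simp)⟩
      obtain ⟨i, c, hsc⟩ := pvScanA_some x y hxy hnp.1 hnp.2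
      obtain ⟨hB, hc, htake, hix, hiy⟩ := pvScanA_spec x y i c hsc
      have hmemx : '(' ∈ x := by
        rw [Bool.and_eq_true] at hin
        exact (List.singleton_infix_iff _ _).1 ((PySem.Chars.isIn_iff_infix _ _).1 hin.1)
      have hmemy : '(' ∈ y := by
        rw [Bool.and_eq_true] at hin
        exact (List.singleton_infix_iff _ _).1 ((PySem.Chars.isIn_iff_infix _ _).1 hin.2)
      have hopens : PySem.Chars.count (PySem.Chars.slice x none (some ((i : Nat) : Int))) ['('] = c := by
        rw [PySem.Chars.slice_eq_listSlice, PySem.List.slice_to_natCast, pvCountSingleton, hc]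
      have hBv : pvUnifB x y = pvBranchB
          (PySem.Chars.slice x (some ((i : Nat) : Int)) (some (PySem.Chars.len x - (c : Int))))
          (PySem.Chars.slice y (some ((i : Nat) : Int)) (some (PySem.Chars.len y - (c : Int)))) := by
        simp only [pvUnifB, pvBranchB, hbe, hin, if_true, Bool.false_eq_true, if_false, hB, hopens]
      rcases Nat.eq_zero_or_pos c with hc0 | hcpos
      · -- cnt = 0: A strips both parameters to [], B keeps the (-containing suffixes; both fail
        subst hc0
        have hxt : '(' ∉ x.take i := by
          intro hm
          have := List.count_pos_iff.2 hm
          omega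
        have hyt : '(' ∉ y.take i := by rw [← htake]; exact hxt
        have hxd : '(' ∈ x.drop i := by
          have hsplit : '(' ∈ x.take i ++ x.drop i := by rw [List.take_append_drop]; exact hmemx
          rcases List.mem_append.1 hsplit with hm | hm
          · exact absurd hm hxt
          · exact hm
        have hyd : '(' ∈ y.drop i := by
          have hsplit : '(' ∈ y.take i ++ y.drop i := by rw [List.take_append_drop]; exact hmemy
          rcases List.mem_append.1 hsplit with hm | hm
          · exact absurd hm hyt
          · exact hm
        have hA : pvMGUstepA x y subs = some (false, subs) := by
          simp only [pvMGUstepA, hbe, Bool.false_eq_true, if_false, hin, if_true, hsc,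
            Option.map_some]
          have hz1 : PySem.Chars.slice x (some ((i : Nat) : Int)) (some (-((0 : Nat) : Int))) = [] := by
            rw [PySem.Chars.slice_eq_listSlice]
            simpa using pvSliceZero x i
          have hz2 : PySem.Chars.slice y (some ((i : Nat) : Int)) (some (-((0 : Nat) : Int))) = [] := by
            rw [PySem.Chars.slice_eq_listSlice]
            simpa using pvSliceZero y i
          rw [hz1, hz2]
          have hv : pvIsVariableA [] = false := by
            simp [pvIsVariableA, PySem.Chars.len_eq]
          simp [hv]
        have hBf : pvUnifB x y = false := by
          rw [hBv]
          have hs1 : PySem.Chars.slice x (some ((i : Nat) : Int)) (some (PySem.Chars.len x - ((0 : Nat) : Int))) = x.drop i := by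
            rw [PySem.Chars.slice_eq_listSlice, PySem.Chars.len_eq]
            simpa using pvSliceFull x i
          have hs2 : PySem.Chars.slice y (some ((i : Nat) : Int)) (some (PySem.Chars.len y - ((0 : Nat) : Int))) = y.drop i := by
            rw [PySem.Chars.slice_eq_listSlice, PySem.Chars.len_eq]
            simpa using pvSliceFull y i
          rw [hs1, hs2]
          unfold pvBranchB
          have hi1 : PySem.Chars.isIn ['('] (x.drop i) = true :=
            (PySem.Chars.isIn_iff_infix _ _).2 ((List.singleton_infix_iff _ _).2 hxd)
          have hi2 : PySem.Chars.isIn ['('] (y.drop i) = true :=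
            (PySem.Chars.isIn_iff_infix _ _).2 ((List.singleton_infix_iff _ _).2 hyd)
          simp [hi1, hi2]
        rw [hA, hBf]
        exact ⟨subs, rfl⟩
      · -- cnt > 0: the slices of the two ports coincide
        have hcx : c ≤ x.length := le_trans (hc ▸ le_trans (List.count_le_length) (by simp)) hix
        have hcy : c ≤ y.length := by
          have hcy' : c = (y.take i).count '(' := by rw [hc, htake]
          exact le_trans (hcy' ▸ le_trans (List.count_le_length) (by simp)) hiy
        have hq1 : PySem.Chars.slice x (some ((i : Nat) : Int)) (some (-((c : Nat) : Int))) =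
            PySem.Chars.slice x (some ((i : Nat) : Int)) (some (PySem.Chars.len x - (c : Int))) := by
          rw [PySem.Chars.slice_eq_listSlice, PySem.Chars.slice_eq_listSlice, PySem.Chars.len_eq]
          exact pvSliceNeg x i c hcpos hcx
        have hq2 : PySem.Chars.slice y (some ((i : Nat) : Int)) (some (-((c : Nat) : Int))) =
            PySem.Chars.slice y (some ((i : Nat) : Int)) (some (PySem.Chars.len y - (c : Int))) := by
          rw [PySem.Chars.slice_eq_listSlice, PySem.Chars.slice_eq_listSlice, PySem.Chars.len_eq]
          exact pvSliceNeg y i c hcpos hcy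
        have hA : pvMGUstepA x y subs = pvBranchA
            (PySem.Chars.slice x (some ((i : Nat) : Int)) (some (PySem.Chars.len x - (c : Int))))
            (PySem.Chars.slice y (some ((i : Nat) : Int)) (some (PySem.Chars.len y - (c : Int)))) subs := by
          simp only [pvMGUstepA, hbe, Bool.false_eq_true, if_false, hin, if_true, hsc,
            Option.map_some, hq1, hq2, pvBranchA]
        rw [hA, hBv]
        exact pvBranch_eq _ _ subs
    · have hin' : (PySem.Chars.isIn ['('] x && PySem.Chars.isIn ['('] y) = false := by
        rw [← Bool.not_eq_true]; exact hin
      have hA : pvMGUstepA x y subs = pvBranchA x y subs := by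
        simp only [pvMGUstepA, hbe, Bool.false_eq_true, if_false, hin', pvBranchA]
      have hBv : pvUnifB x y = pvBranchB x y := by
        simp only [pvUnifB, pvBranchB, hbe, Bool.false_eq_true, if_false, hin']
      rw [hA, hBv]
      exact pvBranch_eq x y subs

theorem pvLoop_eq : ∀ (pairs : List (List Char × List Char)),
    (∀ p ∈ pairs, pvHazard p.1 p.2 = false) →
    ∀ (subs : PySem.Dict (List Char) (List Char)),
    pvMGUloopA pairs subs = some (pairs.all (fun p => pvUnifB p.1 p.2)) := by
  intro pairs
  induction pairs with
  | nil => intro _ subs; simp [pvMGUloopA]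
  | cons p rest ih =>
    intro h subs
    obtain ⟨d, hd⟩ := pvStep_eq p.1 p.2 (h p (List.mem_cons_self)) subs
    cases hu : pvUnifB p.1 p.2
    · rw [hu] at hd
      simp [pvMGUloopA, hd, hu]
    · rw [hu] at hd
      simp [pvMGUloopA, hd, hu, ih (fun q hq => h q (List.mem_cons_of_mem _ hq)) d]

theorem pvMGU_eq (pr1 pr2 : Bool × List Char × List (List Char))
    (h : ∀ p ∈ pr1.2.2.zip pr2.2.2, pvHazard p.1 p.2 = false)
    (subs : PySem.Dict (List Char) (List Char)) :
    pvMGUA pr1 pr2 subs =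
      some (!(pr1.2.1 != pr2.2.1 || pr1.2.2.length != pr2.2.2.length)
            && (pr1.2.2.zip pr2.2.2).all (fun p => pvUnifB p.1 p.2)) := by
  unfold pvMGUA
  cases hg : (pr1.2.1 != pr2.2.1 || pr1.2.2.length != pr2.2.2.length)
  · simp [pvLoop_eq _ h subs]
  · simp

-- A's inner scan over the whole of sentence_2 equals B's scan over the filtered bucket
theorem pvInner_eq (s1i : String) (i : Nat) (h1 : s1i.toList ≠ []) :
    ∀ (s2 : List String) (j : Nat),
      (∀ s ∈ s2, s.toList ≠ []) →
      (∀ s ∈ s2, ∀ p ∈ (pvPreParams s1i.toList).zip (pvPreParams s.toList),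
         pvHazard p.1 p.2 = false) →
      pvInnerA s1i i s2 j =
        some (pvScanBucketB (pvParseB s1i.toList).2.2 i
          (((((s2.map (fun l => pvParseB l.toList)).zipIdx j).map pvKV).filter
             (fun p => p.1 == ((pvParseB s1i.toList).2.1, !(pvParseB s1i.toList).1))).map (·.2))) := by
  intro s2
  induction s2 with
  | nil => intro j _ _; simp [pvInnerA, pvScanBucketB]
  | cons s rest ih =>
    intro j h2 hz
    have hp1 := pvParse_eq s1i.toList h1
    have hp2 := pvParse_eq s.toList (h2 s (List.mem_cons_self))
    have hz' : ∀ p ∈ (pvParseB s1i.toList).2.2.zip (pvParseB s.toList).2.2,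
        pvHazard p.1 p.2 = false := by
      intro p hp
      exact hz s (List.mem_cons_self) p (by rw [pvPreParams_eq, pvPreParams_eq]; exact hp)
    have hrec := ih (j + 1) (fun t ht => h2 t (List.mem_cons_of_mem _ ht))
      (fun t ht => hz t (List.mem_cons_of_mem _ ht))
    simp only [pvInnerA, hp1, hp2, List.map_cons, List.zipIdx_cons]
    rw [pvMGU_eq (pvParseB s1i.toList) (pvParseB s.toList) hz' PySem.Dict.empty]
    by_cases hkey : ((pvParseB s.toList).2.1, (pvParseB s.toList).1)
        = ((pvParseB s1i.toList).2.1, !(pvParseB s1i.toList).1)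
    · -- the head literal lands in the complementary bucket
      have hpr : (pvParseB s.toList).2.1 = (pvParseB s1i.toList).2.1 :=
        (Prod.mk.injEq _ _ _ _ ▸ hkey).1
      have hng : (pvParseB s.toList).1 = !(pvParseB s1i.toList).1 :=
        (Prod.mk.injEq _ _ _ _ ▸ hkey).2
      have hcond : (((pvParseB s1i.toList).1 != (pvParseB s.toList).1)
          && ((pvParseB s1i.toList).2.1 == (pvParseB s.toList).2.1)) = true := by
        rw [hng, hpr]; cases (pvParseB s1i.toList).1 <;> simp
      have hfilt : (pvKV ((pvParseB s.toList), j)).1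
          == ((pvParseB s1i.toList).2.1, !(pvParseB s1i.toList).1) := by
        simp [pvKV, hkey]
      simp only [hcond, if_true, List.map_cons, List.filter_cons, hfilt, if_true]
      simp only [pvScanBucketB, pvKV]
      cases hok : ((pvParseB s1i.toList).2.2.length == (pvParseB s.toList).2.2.length)
          && ((pvParseB s1i.toList).2.2.zip (pvParseB s.toList).2.2).all
               (fun p => pvUnifB p.1 p.2)
      · have hmgu : (!((pvParseB s1i.toList).2.1 != (pvParseB s.toList).2.1
              || (pvParseB s1i.toList).2.2.length != (pvParseB s.toList).2.2.length)
            && ((pvParseB s1i.toList).2.2.zip (pvParseB s.toList).2.2).all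
                 (fun p => pvUnifB p.1 p.2)) = false := by
          simpa [hpr, bne] using hok
        rw [hmgu]
        simpa using hrec
      · have hmgu : (!((pvParseB s1i.toList).2.1 != (pvParseB s.toList).2.1
              || (pvParseB s1i.toList).2.2.length != (pvParseB s.toList).2.2.length)
            && ((pvParseB s1i.toList).2.2.zip (pvParseB s.toList).2.2).all
                 (fun p => pvUnifB p.1 p.2)) = true := by
          simpa [hpr, bne] using hok
        rw [hmgu]
        simp
    · -- the head literal is in another bucket: A's guard fails and the filter drops it
      have hcond : (((pvParseB s1i.toList).1 != (pvParseB s.toList).1)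
          && ((pvParseB s1i.toList).2.1 == (pvParseB s.toList).2.1)) = false := by
        rw [Bool.and_eq_false_iff]
        by_contra hcc
        push Not at hcc
        apply hkey
        have hpr : (pvParseB s1i.toList).2.1 = (pvParseB s.toList).2.1 := by
          have := hcc.2; simpa using this
        have hng : (pvParseB s.toList).1 = !(pvParseB s1i.toList).1 := by
          have := hcc.1
          cases ha : (pvParseB s1i.toList).1 <;> cases hb : (pvParseB s.toList).1 <;>
            simp_all
        rw [hpr, hng]
      have hfilt : ((pvKV ((pvParseB s.toList), j)).1
          == ((pvParseB s1i.toList).2.1, !(pvParseB s1i.toList).1)) = false := by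
        simp only [pvKV, beq_eq_false_iff_ne, ne_eq]
        exact hkey
      simp only [hcond, Bool.false_eq_true, if_false, List.filter_cons, hfilt]
      simpa using hrec

-- B's bucket lookup is the filtered enumeration (library characterisation of the fold)
theorem pvIdx_getD (right : List (Bool × List Char × List (List Char)))
    (key : List Char × Bool) :
    (((right.zipIdx).map pvKV).foldl
        (fun d p => d.modify p.1 [] (· ++ [p.2])) PySem.Dict.empty).getD key [] =
      ((((right.zipIdx).map pvKV).filter (fun p => p.1 == key)).map (·.2)) := by
  rw [PySem.Dict.getD_foldl_modify_append]
  simp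

theorem pvOuter_eq (s2 : List String)
    (h2 : ∀ s ∈ s2, s.toList ≠ []) :
    ∀ (s1 : List String) (i : Nat),
      (∀ s ∈ s1, s.toList ≠ []) →
      (∀ a ∈ s1, ∀ b ∈ s2, ∀ p ∈ (pvPreParams a.toList).zip (pvPreParams b.toList),
         pvHazard p.1 p.2 = false) →
      pvOuterA s2 s1 i =
        some (pvOuterB
          ((((s2.map (fun l => pvParseB l.toList)).zipIdx).map pvKV).foldl
            (fun d p => d.modify p.1 [] (· ++ [p.2])) PySem.Dict.empty)
          (s1.map (fun l => pvParseB l.toList)) i) := by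
  intro s1
  induction s1 with
  | nil => intro i _ _; simp [pvOuterA, pvOuterB]
  | cons s rest ih =>
    intro i h1 hz
    have hinner := pvInner_eq s i (h1 s (List.mem_cons_self)) s2 0 h2
      (fun b hb => hz s (List.mem_cons_self) b hb)
    have hrec := ih (i + 1) (fun t ht => h1 t (List.mem_cons_of_mem _ ht))
      (fun a ha => hz a (List.mem_cons_of_mem _ ha))
    simp only [pvOuterA, pvOuterB, List.map_cons, hinner,
      pvIdx_getD (s2.map (fun l => pvParseB l.toList))
        ((pvParseB s.toList).2.1, !(pvParseB s.toList).1)]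
    cases hI : pvScanBucketB (pvParseB s.toList).2.2 i
        (((((s2.map (fun l => pvParseB l.toList)).zipIdx 0).map pvKV).filter
           (fun p => p.1 == ((pvParseB s.toList).2.1, !(pvParseB s.toList).1))).map (·.2)) <;>
      simp [hrec]

-- ===== VERDICT (by name: the statement is the Claim_ definition above) =====
theorem isResolvable_spec : Claim_equal_isResolvable := by
  intro s1 s2 _hdom hpre
  unfold Spec_isResolvable isResolvable isResolvable_alt
  unfold Pre_isResolvable at hpre
  simp only [Bool.and_eq_true, List.all_eq_true] at hpre
  obtain ⟨⟨hne1, hne2⟩, hz⟩ := hpre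
  rw [pvOuter_eq s2 (fun s hs => by simpa using hne2 s hs) s1 0
      (fun s hs => by simpa using hne1 s hs)
      (fun a ha b hb p hp => by simpa using hz a ha b hb p hp)]
  cases hres : pvOuterB
      ((((s2.map (fun l => pvParseB l.toList)).zipIdx).map pvKV).foldl
        (fun d p => d.modify p.1 [] (· ++ [p.2])) PySem.Dict.empty)
      (s1.map (fun l => pvParseB l.toList)) 0 <;>
    simp [hres]
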